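-- pv_equiv track=rewrite | github.com/picosdh/codetree-TILs | 241121/가장 왼쪽에 있는 최댓값/leftmost-max-value.py | go
-- ===== SOURCE A (Python) =====
-- def go(maxV, l):
--     maxi = 0
--     for i in range(len(l)):
--         if l[i] >= maxV:
--             if l[i] == maxV:
--                 pass
--             else:
--                 maxi = i+1
--                 maxV = l[i]
--     return maxi
-- ===== SOURCE B (Python) =====
-- def go(maxV, l):
--     if not l:
--         return 0
--     m = max(l)
--     if m > maxV:
--         return l.index(m) + 1
--     return 0
-- ===== Notes on version B (the rewrite author's own statement) =====
-- stated objective: idiomatic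
-- what changed: A's single running-max loop that tracks (maxi, maxV) is replaced by the two-pass library decomposition: guard the empty list, compute m = max(l), and return l.index(m)+1 if m > maxV else 0.
import Mathlib
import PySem

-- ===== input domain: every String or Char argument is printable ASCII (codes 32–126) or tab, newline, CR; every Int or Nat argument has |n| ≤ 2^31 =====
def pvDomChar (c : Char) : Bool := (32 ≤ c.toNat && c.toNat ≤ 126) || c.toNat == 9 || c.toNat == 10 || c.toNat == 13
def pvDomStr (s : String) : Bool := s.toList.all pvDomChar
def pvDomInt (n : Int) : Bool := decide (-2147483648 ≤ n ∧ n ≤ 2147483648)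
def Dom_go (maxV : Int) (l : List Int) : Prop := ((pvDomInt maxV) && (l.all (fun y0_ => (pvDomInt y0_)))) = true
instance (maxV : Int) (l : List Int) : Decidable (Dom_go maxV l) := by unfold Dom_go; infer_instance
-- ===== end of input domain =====

-- B replaces A's hand-rolled running-max/index loop by the idiomatic two-pass max()+index() decomposition (objective: idiomatic; no speed claim).

-- ===== PORT A =====
-- A's for-loop over indices, as structural recursion carrying (maxi, maxV) and the 0-based index i of the current element
def goLoop (maxi maxV i : Int) : List Int → Int
  | [] => maxi
  | x :: xs =>
    if x ≥ maxV then
      if x = maxV then goLoop maxi maxV (i + 1) xs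
      else goLoop (i + 1) x (i + 1) xs
    else goLoop maxi maxV (i + 1) xs

def go (maxV : Int) (l : List Int) : Int := goLoop 0 maxV 0 l

-- ===== PORT B =====
-- max(l) never raises here (the empty list is guarded), and l.index(m) never raises since m ∈ l,
-- so the '.getD 0' default of index? is never taken.
def go_alt (maxV : Int) (l : List Int) : Int :=
  match l with
  | [] => 0
  | _ :: _ =>
    match PySem.List.max? l (fun x => x) with
    | none => 0
    | some m => if m > maxV then (((PySem.List.index? l m).getD 0 : Nat) : Int) + 1 else 0

-- ===== PRECONDITION & SPEC =====
def Spec_go (maxV : Int) (l : List Int) (out : Int) : Prop := out = go_alt maxV l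
instance (maxV : Int) (l : List Int) (out : Int) : Decidable (Spec_go maxV l out) := by unfold Spec_go; infer_instance

-- ===== CLAIM (what is proved, stated in full; the proofs are below) =====
def Claim_equal_go : Prop := ∀ (maxV : Int) (l : List Int), Dom_go maxV l → Spec_go maxV l (go maxV l)

-- ===== LEMMAS AND PROOFS =====

-- closed characterisation of A's loop: 'if some element beats maxV, i + 1-based position of the
-- leftmost maximum, else maxi unchanged'
def goSpec (l : List Int) (i maxi maxV : Int) : Int :=
  match l with
  | [] => maxi
  | x :: xs =>
    if maxV < xs.foldl max x then
      i + (((PySem.List.index? l (xs.foldl max x)).getD 0 : Nat) : Int) + 1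
    else maxi

lemma goLoop_cons (maxi maxV i x : Int) (xs : List Int) :
    goLoop maxi maxV i (x :: xs) =
      if x ≥ maxV then
        if x = maxV then goLoop maxi maxV (i + 1) xs
        else goLoop (i + 1) x (i + 1) xs
      else goLoop maxi maxV (i + 1) xs := rfl

lemma foldl_max_init (l : List Int) : ∀ a b : Int, l.foldl max (max a b) = max a (l.foldl max b) := by
  induction l with
  | nil => intro a b; rfl
  | cons x t ih =>
    intro a b
    simp only [List.foldl_cons]
    rw [max_assoc, ih]

lemma getD_index?_cons_of_ne {x m : Int} {xs : List Int} (hne : x ≠ m) (hmem : m ∈ xs) :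
    (((PySem.List.index? (x :: xs) m).getD 0 : Nat) : Int) =
      (((PySem.List.index? xs m).getD 0 : Nat) : Int) + 1 := by
  obtain ⟨k, hk⟩ := Option.isSome_iff_exists.mp ((PySem.List.index?_isSome_iff xs m).mpr hmem)
  rw [PySem.List.index?_cons_of_ne _ hne, hk]
  simp

lemma goLoop_eq (l : List Int) : ∀ i maxi maxV : Int,
    goLoop maxi maxV i l = goSpec l i maxi maxV := by
  induction l with
  | nil => intro i maxi maxV; rfl
  | cons x xs ih =>
    intro i maxi maxV
    cases xs with
    | nil =>
      by_cases h2 : x = maxV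
      · subst h2
        simp [goLoop, goSpec]
      · by_cases h1 : maxV < x
        · have hge : x ≥ maxV := le_of_lt h1
          simp [goLoop, goSpec, hge, h2, h1]
        · have hnge : ¬ x ≥ maxV := by omega
          simp [goLoop, goSpec, hnge, h1]
    | cons y ys =>
      have hm : List.foldl max x (y :: ys) = max x (List.foldl max y ys) := by
        simp only [List.foldl_cons]
        rw [← foldl_max_init]
      have hmem : List.foldl max y ys ∈ y :: ys := by
        rcases PySem.List.foldl_max_mem ys y with h | h
        · rw [h]; exact List.mem_cons_self
        · exact List.mem_cons_of_mem _ h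
      by_cases h2 : x = maxV
      · subst h2
        rw [goLoop_cons, if_pos (le_refl x), if_pos rfl, ih]
        simp only [goSpec, hm]
        by_cases hlt : x < List.foldl max y ys
        · rw [max_eq_right (le_of_lt hlt), if_pos hlt, if_pos hlt,
            getD_index?_cons_of_ne (ne_of_lt hlt) hmem]
          omega
        · have hx : ¬ x < max x (List.foldl max y ys) := by
            rcases max_choice x (List.foldl max y ys) with h | h <;> rw [h] <;> omega
          rw [if_neg hlt, if_neg hx]
      · by_cases h1 : maxV < x
        · rw [goLoop_cons, if_pos (le_of_lt h1), if_neg h2, ih]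
          simp only [goSpec, hm]
          have hout : maxV < max x (List.foldl max y ys) := lt_of_lt_of_le h1 (le_max_left _ _)
          rw [if_pos hout]
          by_cases hlt : x < List.foldl max y ys
          · rw [max_eq_right (le_of_lt hlt), if_pos hlt,
              getD_index?_cons_of_ne (ne_of_lt hlt) hmem]
            omega
          · rw [max_eq_left (not_lt.mp hlt), if_neg hlt, PySem.List.index?_cons_self]
            simp
        · have hnge : ¬ x ≥ maxV := by omega
          rw [goLoop_cons, if_neg hnge, ih]
          simp only [goSpec, hm]
          by_cases hlt2 : maxV < List.foldl max y ys
          · have hxm : x < List.foldl max y ys := by omega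
            rw [max_eq_right (le_of_lt hxm), if_pos hlt2, if_pos hlt2,
              getD_index?_cons_of_ne (ne_of_lt hxm) hmem]
            omega
          · have hx : ¬ maxV < max x (List.foldl max y ys) := by
              rcases max_choice x (List.foldl max y ys) with h | h <;> rw [h] <;> omega
            rw [if_neg hlt2, if_neg hx]

-- ===== VERDICT (by name: the statement is the Claim_ definition above) =====
theorem go_spec : Claim_equal_go := by
  intro maxV l _
  unfold Spec_go go go_alt
  cases l with
  | nil => rfl
  | cons x xs =>
    rw [goLoop_eq]
    by_cases h : maxV < List.foldl max x xs
    · simp only [goSpec, PySem.List.max?_id_cons, gt_iff_lt, if_pos h]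
      omega
    · simp only [goSpec, PySem.List.max?_id_cons, gt_iff_lt, if_neg h]
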